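-- pv_equiv track=rewrite | github.com/bchwast/AGH-WDI | Ćwiczenia 8_9_10/ex_28.py | check
-- ===== SOURCE A (Python) =====
-- def jedynki(num):
--     ile = 0
--     while num > 0:
--         if num%2 == 1:
--             ile += 1
--         num //= 2
--     #end for
--     return ile
--
-- def check(set1, set2, set3, id1, id2, id3):
--     s1 = 0
--     for i in range(id1):
--         s1 += jedynki(set1[i])
--     s2 = 0
--     for i in range(id2):
--         s2 += jedynki(set2[i])
--     s3 = 0
--     for i in range(id3):
--         s3 += jedynki(set3[i])
--     return s1 == s2 == s3
-- ===== SOURCE B (Python) =====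
-- def popcount(num):
--     count = 0
--     while num > 0:
--         num &= num - 1
--         count += 1
--     return count
--
--
-- def check(set1, set2, set3, id1, id2, id3):
--     s1 = sum(popcount(set1[i]) for i in range(id1))
--     s2 = sum(popcount(set2[i]) for i in range(id2))
--     s3 = sum(popcount(set3[i]) for i in range(id3))
--     return s1 == s2 == s3
-- ===== Notes on version B (the rewrite author's own statement) =====
-- stated objective: faster
-- what changed: The per-element popcount is replaced by Brian Kernighan's bit-clearing loop (num &= num-1, one iteration per set bit instead of one per bit position), and the three prefix sums are built with sum() over generators instead of explicit accumulator loops.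
import Mathlib
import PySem

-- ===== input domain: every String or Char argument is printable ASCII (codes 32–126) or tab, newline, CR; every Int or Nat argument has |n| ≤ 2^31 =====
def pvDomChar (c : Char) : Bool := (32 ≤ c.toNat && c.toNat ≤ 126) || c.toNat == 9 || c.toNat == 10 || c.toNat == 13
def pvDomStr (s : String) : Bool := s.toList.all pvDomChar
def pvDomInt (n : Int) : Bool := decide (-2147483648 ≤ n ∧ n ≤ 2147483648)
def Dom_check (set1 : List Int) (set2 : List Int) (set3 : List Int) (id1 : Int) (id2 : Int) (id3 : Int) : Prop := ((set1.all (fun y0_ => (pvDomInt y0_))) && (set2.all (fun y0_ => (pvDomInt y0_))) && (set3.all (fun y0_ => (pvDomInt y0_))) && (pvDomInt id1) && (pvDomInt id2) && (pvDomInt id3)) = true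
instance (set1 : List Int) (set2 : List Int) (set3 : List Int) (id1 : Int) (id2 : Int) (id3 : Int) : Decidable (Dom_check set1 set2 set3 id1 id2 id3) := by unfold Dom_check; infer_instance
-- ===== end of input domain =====

-- B replaces the all-bit-positions popcount by Brian Kernighan's bit-clearing loop (one
-- iteration per set bit) and builds the three prefix sums with sum() over generators.


-- ===== PORT A =====
-- while num > 0: if num % 2 == 1: ile += 1 ; num //= 2
def jedynkiGo (num ile : Int) : Int :=
  if num > 0 then
    jedynkiGo (PySem.Int.floordiv num 2) (if PySem.Int.mod num 2 == 1 then ile + 1 else ile)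
  else ile
termination_by num.toNat
decreasing_by
  rw [PySem.Int.floordiv_eq_ediv_of_pos (by omega)]
  omega

def jedynki (num : Int) : Int := jedynkiGo num 0

def check (set1 : List Int) (set2 : List Int) (set3 : List Int) (id1 : Int) (id2 : Int) (id3 : Int) : Bool :=
  let s1 := (PySem.List.pyRange 0 id1 1).foldl (fun s i => s + jedynki (PySem.List.pyGetD set1 i 0)) 0
  let s2 := (PySem.List.pyRange 0 id2 1).foldl (fun s i => s + jedynki (PySem.List.pyGetD set2 i 0)) 0
  let s3 := (PySem.List.pyRange 0 id3 1).foldl (fun s i => s + jedynki (PySem.List.pyGetD set3 i 0)) 0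
  s1 == s2 && s2 == s3

-- ===== PORT B =====
-- termination of Kernighan's loop: n & (n-1) strictly decreases for n > 0
lemma kern_dec (num : Int) (h : num > 0) : (PySem.Int.band num (num - 1)).toNat < num.toNat := by
  obtain ⟨m, rfl⟩ : ∃ m : Nat, num = (m : Int) := ⟨num.toNat, by omega⟩
  have h2 : (m : Int) - 1 = ((m - 1 : Nat) : Int) := by omega
  rw [h2, PySem.Int.band_natCast]
  have : m &&& (m - 1) ≤ m - 1 := Nat.and_le_right
  omega

-- while num > 0: num &= num - 1 ; count += 1
def popcountGo (num count : Int) : Int :=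
  if h : num > 0 then popcountGo (PySem.Int.band num (num - 1)) (count + 1) else count
termination_by num.toNat
decreasing_by exact kern_dec num h

def popcount (num : Int) : Int := popcountGo num 0

def check_alt (set1 : List Int) (set2 : List Int) (set3 : List Int) (id1 : Int) (id2 : Int) (id3 : Int) : Bool :=
  let s1 := ((PySem.List.pyRange 0 id1 1).map (fun i => popcount (PySem.List.pyGetD set1 i 0))).sum
  let s2 := ((PySem.List.pyRange 0 id2 1).map (fun i => popcount (PySem.List.pyGetD set2 i 0))).sum
  let s3 := ((PySem.List.pyRange 0 id3 1).map (fun i => popcount (PySem.List.pyGetD set3 i 0))).sum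
  s1 == s2 && s2 == s3

-- ===== PRECONDITION & SPEC =====
-- Python A raises IndexError when some idK exceeds the length of setK; excluded here.
def Pre_check (set1 : List Int) (set2 : List Int) (set3 : List Int) (id1 : Int) (id2 : Int) (id3 : Int) : Prop :=
  id1 ≤ (set1.length : Int) ∧ id2 ≤ (set2.length : Int) ∧ id3 ≤ (set3.length : Int)
instance (set1 : List Int) (set2 : List Int) (set3 : List Int) (id1 : Int) (id2 : Int) (id3 : Int) : Decidable (Pre_check set1 set2 set3 id1 id2 id3) := by unfold Pre_check; infer_instance

def pvWitness_check : List Int × List Int × List Int × Int × Int × Int := ([3, 5], [6], [7, 0, 1], 2, 1, 1)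

def Spec_check (set1 : List Int) (set2 : List Int) (set3 : List Int) (id1 : Int) (id2 : Int) (id3 : Int) (out : Bool) : Prop := out = check_alt set1 set2 set3 id1 id2 id3
instance (set1 : List Int) (set2 : List Int) (set3 : List Int) (id1 : Int) (id2 : Int) (id3 : Int) (out : Bool) : Decidable (Spec_check set1 set2 set3 id1 id2 id3 out) := by unfold Spec_check; infer_instance

-- ===== CLAIM (what is proved, stated in full; the proofs are below) =====
def Claim_equal_check : Prop := ∀ (set1 : List Int) (set2 : List Int) (set3 : List Int) (id1 : Int) (id2 : Int) (id3 : Int), Dom_check set1 set2 set3 id1 id2 id3 → Pre_check set1 set2 set3 id1 id2 id3 → Spec_check set1 set2 set3 id1 id2 id3 (check set1 set2 set3 id1 id2 id3)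

-- ===== LEMMAS AND PROOFS =====
lemma land_odd_even (a b : Nat) : (2*a+1) &&& (2*b) = 2*(a &&& b) := by
  simpa [Nat.bit_val, Nat.land] using Nat.bitwise_bit (f := and) (a := true) (m := a) (b := false) (n := b)

lemma land_even_odd (a b : Nat) : (2*a) &&& (2*b+1) = 2*(a &&& b) := by
  simpa [Nat.bit_val, Nat.land] using Nat.bitwise_bit (f := and) (a := false) (m := a) (b := true) (n := b)

lemma bc_even (k : Nat) : PySem.Int.bitCount ((2*k : Nat) : Int) = PySem.Int.bitCount (k : Int) := by
  rcases Nat.eq_zero_or_pos k with h | h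
  · simp [h]
  · rw [PySem.Int.bitCount_natCast (m := 2*k) (by omega)]
    simp

lemma bc_odd (k : Nat) : PySem.Int.bitCount ((2*k+1 : Nat) : Int) = 1 + PySem.Int.bitCount (k : Int) := by
  rw [PySem.Int.bitCount_natCast (m := 2*k+1) (by omega)]
  have h1 : (2*k+1) % 2 = 1 := by omega
  have h2 : (2*k+1) / 2 = k := by omega
  rw [h1, h2]

-- clearing the lowest set bit removes exactly one set bit
lemma bc_land_pred (m : Nat) (h : 0 < m) :
    PySem.Int.bitCount ((m &&& (m-1) : Nat) : Int) + 1 = PySem.Int.bitCount (m : Int) := by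
  induction m using Nat.strong_induction_on with
  | _ m ih =>
    rcases Nat.even_or_odd m with ⟨k, hk⟩ | ⟨k, hk⟩
    · have hk0 : 0 < k := by omega
      have hm : m = 2*k := by omega
      have hm1 : m - 1 = 2*(k-1)+1 := by omega
      rw [hm1, hm, land_even_odd, bc_even, bc_even, ← ih k (by omega) hk0]
    · have hm : m = 2*k+1 := by omega
      have hm1 : m - 1 = 2*k := by omega
      rw [hm1, hm, land_odd_even, Nat.and_self, bc_even, bc_odd]
      omega

lemma key_int (n : Int) (h : 0 < n) :
    (PySem.Int.bitCount (PySem.Int.band n (n-1)) : Int) + 1 = (PySem.Int.bitCount n : Int) := by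
  obtain ⟨m, rfl⟩ : ∃ m : Nat, n = (m : Int) := ⟨n.toNat, by omega⟩
  have h2 : (m : Int) - 1 = ((m - 1 : Nat) : Int) := by omega
  rw [h2, PySem.Int.band_natCast]
  exact_mod_cast bc_land_pred m (by exact_mod_cast h)

lemma band_pred_nonneg (n : Int) (h : 0 < n) : 0 ≤ PySem.Int.band n (n-1) := by
  obtain ⟨m, rfl⟩ : ∃ m : Nat, n = (m : Int) := ⟨n.toNat, by omega⟩
  have h2 : (m : Int) - 1 = ((m - 1 : Nat) : Int) := by omega
  rw [h2, PySem.Int.band_natCast]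
  positivity

lemma jedynkiGo_eq (n acc : Int) :
    jedynkiGo n acc = acc + (if 0 < n then (PySem.Int.bitCount n : Int) else 0) := by
  by_cases h : 0 < n
  · rw [jedynkiGo]
    simp only [h, if_pos]
    rw [jedynkiGo_eq (PySem.Int.floordiv n 2)]
    rw [PySem.Int.bitCount_of_pos h]
    have hm2 : PySem.Int.mod n 2 = 0 ∨ PySem.Int.mod n 2 = 1 := by
      have h1 := PySem.Int.mod_nonneg n (b := 2) (by omega)
      have h2 := PySem.Int.mod_lt n (b := 2) (by omega)
      omega
    have hfd : 0 ≤ PySem.Int.floordiv n 2 := by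
      rw [PySem.Int.floordiv_eq_ediv_of_pos (by omega)]; omega
    by_cases hp : 0 < PySem.Int.floordiv n 2
    · simp only [hp, if_pos]
      rcases hm2 with h0 | h0 <;> simp [h0] <;> omega
    · have hz : PySem.Int.floordiv n 2 = 0 := by omega
      simp only [hz]
      rcases hm2 with h0 | h0 <;> simp [h0] <;> omega
  · rw [jedynkiGo]
    simp [h]
termination_by n.toNat
decreasing_by
  rw [PySem.Int.floordiv_eq_ediv_of_pos (by omega)]
  omega

lemma popcountGo_eq (n count : Int) :
    popcountGo n count = count + (if 0 < n then (PySem.Int.bitCount n : Int) else 0) := by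
  by_cases h : 0 < n
  · rw [popcountGo]
    simp only [h, dif_pos, if_pos]
    rw [popcountGo_eq (PySem.Int.band n (n-1))]
    have hk := key_int n h
    have hnn := band_pred_nonneg n h
    by_cases hp : 0 < PySem.Int.band n (n-1)
    · rw [if_pos hp]; omega
    · have hz : PySem.Int.band n (n-1) = 0 := by omega
      rw [if_neg hp]
      rw [hz, show PySem.Int.bitCount (0:Int) = 0 from by decide] at hk
      omega
  · rw [popcountGo]; simp [h]
termination_by n.toNat
decreasing_by exact kern_dec n h

lemma jedynki_eq_popcount (n : Int) : jedynki n = popcount n := by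
  rw [jedynki, popcount, jedynkiGo_eq, popcountGo_eq]

-- ===== VERDICT (by name: the statement is the Claim_ definition above) =====
theorem check_spec : Claim_equal_check := by
  intro set1 set2 set3 id1 id2 id3 _ _
  unfold Spec_check check check_alt
  simp only [PySem.List.foldl_add, jedynki_eq_popcount, zero_add]
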